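-- pv_equiv track=rewrite | github.com/yiju-zhao/DeepSight-Django | backend/agents/report_agent/knowledge_storm/storm_wiki/modules/outline_rater.py | parse_outline_l2_sections
-- ===== SOURCE A (Python) =====
-- def parse_outline_l2_sections(l1_section_content: str) -> dict[str, str]:
--     """
--     Parse an L1 section content and extract each L2 subsection with all its content.
--
--     Args:
--         l1_section_content: Content of an L1 section including all subheadings
--
--     Returns:
--         Dictionary with L2 headings as keys and their content (including L3+) as values
--     """
--     if not l1_section_content:
--         return {}
--
--     l2_sections = {}
--     lines = l1_section_content.split("\n")
--     current_l2 = None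
--     current_content = []
--
--     # Skip the L1 heading line
--     start_idx = 0
--     for i, line in enumerate(lines):
--         if line.strip().startswith("# "):
--             start_idx = i + 1
--             break
--
--     for i, line in enumerate(lines[start_idx:]):
--         # Check if this is an L2 heading
--         if line.strip().startswith("## "):
--             # If we've been collecting content for a previous heading, save it
--             if current_l2 and current_content:
--                 l2_sections[current_l2] = "\n".join(current_content)
--                 current_content = []
--
--             # Start a new L2 section
--             current_l2 = line.strip()
--             current_content = [line]
--         # If we're inside an L2 section, keep collecting content
--         elif current_l2:
--             current_content.append(line)
--
--     # Save the last section if we have one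
--     if current_l2 and current_content:
--         l2_sections[current_l2] = "\n".join(current_content)
--
--     return l2_sections
-- ===== SOURCE B (Python) =====
-- def parse_outline_l2_sections(l1_section_content: str) -> dict[str, str]:
--     lines = l1_section_content.split("\n")
--
--     # Skip everything up to and including the first L1 heading line (if any).
--     start_idx = 0
--     for i, line in enumerate(lines):
--         if line.strip().startswith("# "):
--             start_idx = i + 1
--             break
--     rest = lines[start_idx:]
--
--     # Chunk the remaining lines at L2-heading boundaries: each section is the
--     # heading line together with every line up to (not including) the next
--     # L2 heading; lines before the first L2 heading are discarded.
--     pairs = []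
--     n = len(rest)
--     i = 0
--     while i < n:
--         if rest[i].strip().startswith("## "):
--             j = i + 1
--             while j < n and not rest[j].strip().startswith("## "):
--                 j += 1
--             pairs.append((rest[i].strip(), "\n".join(rest[i:j])))
--             i = j
--         else:
--             i += 1
--     return dict(pairs)
-- ===== Notes on version B (the rewrite author's own statement) =====
-- stated objective: alternative
-- what changed: A is a single stateful pass with a current-heading/current-content accumulator and an end-of-loop flush; B instead chunks the line list at L2-heading boundaries (two-pointer slicing: each section is heading line through the line before the next heading), builds the (heading, block) pair list, and turns it into a dict at the end.
import Mathlib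
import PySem

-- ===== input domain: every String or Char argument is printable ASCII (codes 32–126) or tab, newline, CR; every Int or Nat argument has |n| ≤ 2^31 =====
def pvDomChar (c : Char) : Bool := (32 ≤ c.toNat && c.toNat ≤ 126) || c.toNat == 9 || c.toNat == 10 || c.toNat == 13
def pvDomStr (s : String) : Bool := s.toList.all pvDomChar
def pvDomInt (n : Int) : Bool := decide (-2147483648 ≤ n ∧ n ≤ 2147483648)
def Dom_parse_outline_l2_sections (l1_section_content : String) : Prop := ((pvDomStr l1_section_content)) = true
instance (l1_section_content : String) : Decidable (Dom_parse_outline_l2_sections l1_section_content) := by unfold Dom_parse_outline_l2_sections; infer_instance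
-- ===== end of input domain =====

-- B replaces A's stateful accumulator pass by boundary chunking (slice each L2 section out
-- of the line list); same O(n) cost, different decomposition. Return-value equivalence only
-- (neither mutates its argument).

-- ===== PORT A =====
-- shared helper: the 'skip the L1 heading line' loop, identical in both Pythons
-- (returns i+1 for the first line whose strip() starts with "# ", else 0)
def pvStartIdx : List String → Nat → Nat
  | [], _ => 0
  | l :: ls, i =>
    if PySem.Str.startswith (PySem.Str.strip l) "# " then i + 1 else pvStartIdx ls (i + 1)

-- line.strip().startswith("## "), identical test in both Pythons
def pvIsL2 (l : String) : Bool := PySem.Str.startswith (PySem.Str.strip l) "## "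

-- A's loop state: (l2_sections, current_l2, current_content); current_l2 = None and
-- current_l2 = "" are indistinguishable in A (only truthiness-tested / used as key when
-- truthy), so None is modelled as "".
def pvAStep (st : PySem.Dict String String × String × List String) (line : String) :
    PySem.Dict String String × String × List String :=
  if pvIsL2 line then
    let d' := if st.2.1 ≠ "" ∧ st.2.2 ≠ [] then st.1.insert st.2.1 (PySem.Str.join "\n" st.2.2) else st.1
    (d', PySem.Str.strip line, [line])
  else if st.2.1 ≠ "" then (st.1, st.2.1, st.2.2 ++ [line])
  else st

-- the trailing 'if current_l2 and current_content: save' flush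
def pvAFlush (st : PySem.Dict String String × String × List String) : PySem.Dict String String :=
  if st.2.1 ≠ "" ∧ st.2.2 ≠ [] then st.1.insert st.2.1 (PySem.Str.join "\n" st.2.2) else st.1

def parse_outline_l2_sections (l1_section_content : String) : List (String × String) :=
  if l1_section_content == "" then [] else
  let lines := (PySem.Str.split? l1_section_content "\n").getD []  -- sep "\n" ≠ "": split? is never none
  let start_idx := pvStartIdx lines 0
  (pvAFlush ((lines.drop start_idx).foldl pvAStep ((PySem.Dict.empty : PySem.Dict String String), "", ([] : List String)))).items

-- ===== PORT B =====
-- B's chunking loop: advance past non-heading lines; at a heading, the section is the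
-- heading line plus the following lines up to the next heading (the two-pointer j-scan /
-- rest[i:j] slice becomes head :: takeWhile, and i = j becomes recursing on dropWhile).
def pvSections : List String → List (String × String)
  | [] => []
  | l :: ls =>
    if pvIsL2 l then
      (PySem.Str.strip l, PySem.Str.join "\n" (l :: ls.takeWhile (fun x => !pvIsL2 x)))
        :: pvSections (ls.dropWhile (fun x => !pvIsL2 x))
    else pvSections ls
termination_by xs => xs.length
decreasing_by
  · have := List.length_dropWhile_le (p := fun x => !pvIsL2 x) (l := ls); simp; omega
  · simp

def parse_outline_l2_sections_alt (l1_section_content : String) : List (String × String) :=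
  let lines := (PySem.Str.split? l1_section_content "\n").getD []  -- sep "\n" ≠ "": split? is never none
  let rest := lines.drop (pvStartIdx lines 0)
  ((pvSections rest).foldl (fun d p => d.insert p.1 p.2)
    (PySem.Dict.empty : PySem.Dict String String)).items

-- ===== PRECONDITION & SPEC =====
def Spec_parse_outline_l2_sections (l1_section_content : String) (out : List (String × String)) : Prop := out = parse_outline_l2_sections_alt l1_section_content
instance (l1_section_content : String) (out : List (String × String)) : Decidable (Spec_parse_outline_l2_sections l1_section_content out) := by unfold Spec_parse_outline_l2_sections; infer_instance

-- ===== CLAIM (what is proved, stated in full; the proofs are below) =====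
def Claim_equal_parse_outline_l2_sections : Prop := ∀ (l1_section_content : String), Dom_parse_outline_l2_sections l1_section_content → Spec_parse_outline_l2_sections l1_section_content (parse_outline_l2_sections l1_section_content)

-- ===== LEMMAS AND PROOFS =====

lemma pvStrip_ne_of_isL2 {l : String} (h : pvIsL2 l = true) : PySem.Str.strip l ≠ "" := by
  intro hc
  unfold pvIsL2 at h
  rw [hc] at h
  exact absurd h (by decide)

-- inside a section (current_l2 = h ≠ "", current_content = cc ≠ []): the rest of A's loop
-- plus the flush computes exactly the B-side sections folded into the dict
lemma pvInside (rest : List String) :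
    ∀ (d : PySem.Dict String String) (h : String) (cc : List String), h ≠ "" → cc ≠ [] →
    pvAFlush (rest.foldl pvAStep (d, h, cc)) =
      ((h, PySem.Str.join "\n" (cc ++ rest.takeWhile (fun x => !pvIsL2 x)))
          :: pvSections (rest.dropWhile (fun x => !pvIsL2 x))).foldl
        (fun d p => d.insert p.1 p.2) d := by
  induction rest with
  | nil =>
    intro d h cc hh hcc
    simp [pvAFlush, pvSections, hh, hcc]
  | cons l ls ih =>
    intro d h cc hh hcc
    by_cases hl : pvIsL2 l = true
    · rw [List.foldl_cons]
      have hstep : pvAStep (d, h, cc) l =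
          (d.insert h (PySem.Str.join "\n" cc), PySem.Str.strip l, [l]) := by
        simp [pvAStep, hl, hh, hcc]
      rw [hstep, ih _ _ _ (pvStrip_ne_of_isL2 hl) (by simp)]
      rw [List.takeWhile_cons, List.dropWhile_cons]
      simp [pvSections, hl]
    · rw [List.foldl_cons]
      have hstep : pvAStep (d, h, cc) l = (d, h, cc ++ [l]) := by
        simp [pvAStep, hl, hh]
      rw [hstep, ih _ _ _ hh (by simp)]
      rw [List.takeWhile_cons, List.dropWhile_cons]
      simp [hl]

-- before the first L2 heading (current_l2 = "", current_content = []): A's loop + flush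
-- equals folding B's sections into the dict
lemma pvLead (rest : List String) : ∀ (d : PySem.Dict String String),
    pvAFlush (rest.foldl pvAStep (d, "", ([] : List String))) =
      (pvSections rest).foldl (fun d p => d.insert p.1 p.2) d := by
  induction rest with
  | nil => intro d; simp [pvAFlush, pvSections]
  | cons l ls ih =>
    intro d
    by_cases hl : pvIsL2 l = true
    · rw [List.foldl_cons]
      have hstep : pvAStep (d, "", ([] : List String)) l = (d, PySem.Str.strip l, [l]) := by
        simp [pvAStep, hl]
      rw [hstep, pvInside ls d _ [l] (pvStrip_ne_of_isL2 hl) (by simp)]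
      simp [pvSections, hl]
    · rw [List.foldl_cons]
      have hstep : pvAStep (d, "", ([] : List String)) l = (d, "", ([] : List String)) := by
        simp [pvAStep, hl]
      rw [hstep, ih]
      simp [pvSections, hl]

-- ===== VERDICT (by name: the statement is the Claim_ definition above) =====
theorem parse_outline_l2_sections_spec : Claim_equal_parse_outline_l2_sections := by
  intro s _
  unfold Spec_parse_outline_l2_sections
  by_cases hs : s == ""
  · have : s = "" := by simpa using hs
    subst this
    have h0 : pvIsL2 "" = false := by decide
    have h1 : PySem.Chars.startswith (PySem.Chars.strip ([] : List Char)) ['#', ' '] = false := by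
      decide
    have hX : (PySem.Str.split? "" "\n").getD [] = [""] := by decide
    simp [parse_outline_l2_sections, parse_outline_l2_sections_alt, hX, pvStartIdx, pvSections,
      h0, h1, PySem.Dict.empty]
  · unfold parse_outline_l2_sections parse_outline_l2_sections_alt
    rw [if_neg (by simpa using hs)]
    exact congrArg PySem.Dict.items (pvLead _ _)
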